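-- pv_equiv track=rewrite | github.com/sangeun99/algorithm | 백준/Gold/1451. 직사각형으로 나누기/직사각형으로 나누기.py | divide_rect
-- ===== SOURCE A (Python) =====
-- def get_sum(rect):
--   result = 0
--   for i in range(len(rect)):
--     for j in range(len(rect[0])):
--       result += rect[i][j]
--   return result
--
-- def divide_rect(rect, level): # level은 1 또는 2
--   # 반으로 나눠
--   h = len(rect)
--   w = len(rect[0])
--
--   max_result = 0
--   for l1 in range(1, h):
--     rect1 = rect[:l1]
--     rect2 = rect[l1:]
--     if level == 1:
--       max_result = max(divide_rect(rect1, 2) * get_sum(rect2), max_result)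
--       max_result = max(divide_rect(rect2, 2) * get_sum(rect1), max_result)
--     else:
--       max_result = max(get_sum(rect1) * get_sum(rect2), max_result)
--
--   for l2 in range(1, w):
--     rect1 = [[0 for _ in range(l2)] for _ in range(h)]
--     rect2 = [[0 for _ in range(w-l2)] for _ in range(h)]
--     for i in range(h):
--       for j in range(w):
--         if j < l2:
--           rect1[i][j] = rect[i][j]
--         else:
--           rect2[i][j-l2] = rect[i][j]
--     if level == 1:
--       max_result = max(divide_rect(rect1, 2) * get_sum(rect2), max_result)
--       max_result = max(divide_rect(rect2, 2) * get_sum(rect1), max_result)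
--     else:
--       max_result = max(get_sum(rect1) * get_sum(rect2), max_result)
--
--   return max_result
-- ===== SOURCE B (Python) =====
-- def build_pref(rect, h, w):
--   # pref[i][j] = sum of rect[a][b] for a < i, b < j (first w columns only)
--   pref = [[0] * (w + 1)]
--   for row in rect:
--     prev = pref[-1]
--     acc = 0
--     cur = [0]
--     for j in range(w):
--       acc += row[j]
--       cur.append(prev[j + 1] + acc)
--     pref.append(cur)
--   return pref
--
-- def query(pref, i0, i1, j0, j1):
--   return pref[i1][j1] - pref[i1][j0] - pref[i0][j1] + pref[i0][j0]
--
-- def split2(pref, i0, i1, j0, j1):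
--   # best product of one further split of the sub-rectangle, floored at 0
--   best = 0
--   for i in range(i0 + 1, i1):
--     best = max(best, query(pref, i0, i, j0, j1) * query(pref, i, i1, j0, j1))
--   for j in range(j0 + 1, j1):
--     best = max(best, query(pref, i0, i1, j0, j) * query(pref, i0, i1, j, j1))
--   return best
--
-- def divide_rect(rect, level): # level은 1 또는 2
--   h = len(rect)
--   w = len(rect[0])
--   pref = build_pref(rect, h, w)
--   if level != 1:
--     return split2(pref, 0, h, 0, w)
--   best = 0
--   for i in range(1, h):
--     best = max(best, split2(pref, 0, i, 0, w) * query(pref, i, h, 0, w))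
--     best = max(best, split2(pref, i, h, 0, w) * query(pref, 0, i, 0, w))
--   for j in range(1, w):
--     best = max(best, split2(pref, 0, h, 0, j) * query(pref, 0, h, j, w))
--     best = max(best, split2(pref, 0, h, j, w) * query(pref, 0, h, 0, j))
--   return best
-- ===== Notes on version B (the rewrite author's own statement) =====
-- stated objective: faster
-- what changed: Replaces A's recursive re-slicing, matrix copying and O(area) get_sum per candidate cut with a single 2D prefix-sum table built once, so every region sum and every second-level split is evaluated by O(1) table lookups.
-- outside the precondition, e.g. on divide_rect([[1], [2, 3]], 2): A returns 5, B returns 2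
import Mathlib
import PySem

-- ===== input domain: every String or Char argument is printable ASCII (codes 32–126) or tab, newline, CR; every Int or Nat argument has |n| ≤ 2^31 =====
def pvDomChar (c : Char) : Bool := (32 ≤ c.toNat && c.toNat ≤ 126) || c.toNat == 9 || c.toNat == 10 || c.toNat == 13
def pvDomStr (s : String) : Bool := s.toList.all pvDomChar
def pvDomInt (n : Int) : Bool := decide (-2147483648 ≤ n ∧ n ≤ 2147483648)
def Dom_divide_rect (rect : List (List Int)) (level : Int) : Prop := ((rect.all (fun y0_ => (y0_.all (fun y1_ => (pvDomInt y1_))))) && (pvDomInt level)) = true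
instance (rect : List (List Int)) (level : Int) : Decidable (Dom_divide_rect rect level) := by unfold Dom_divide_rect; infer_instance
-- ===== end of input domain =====

-- B replaces A's recursive re-slicing/copying and per-cut O(area) sums by one 2D prefix-sum
-- table with O(1) region-sum lookups (measured faster; asymptotically better).


-- ===== PORT A =====
-- get_sum: nested index loops over range(len(rect)) × range(len(rect[0])).
def get_sum (rect : List (List Int)) : Int :=
  (PySem.List.pyRange 0 rect.length 1).foldl (fun result i =>
    (PySem.List.pyRange 0 ((PySem.List.pyGetD rect 0 []).length : Int) 1).foldl (fun result j =>
      result + PySem.List.pyGetD (PySem.List.pyGetD rect i []) j 0) result) 0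

-- Python's recursion only nests through the `level == 1` branch, which calls with level 2,
-- whose branch makes no further calls: depth ≤ 2, so a fuel of 2 is a pure totality guard
-- (it never changes the value on any input Python terminates on).
-- `rect1[i][j] = v` (a fresh, unaliased row) is ported as the pure nested set
-- pySetD m i (pySetD m[i] j v), which is observationally exact here.
def divide_rectFuel : Nat → List (List Int) → Int → Int
  | 0, _, _ => 0
  | fuel+1, rect, level =>
    let h : Int := rect.length
    let w : Int := ((PySem.List.pyGetD rect 0 []).length : Int)
    let m1 := (PySem.List.pyRange 1 h 1).foldl (fun max_result l1 =>
      let rect1 := PySem.List.slice rect none (some l1)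
      let rect2 := PySem.List.slice rect (some l1) none
      if level = 1 then
        let max_result := max (divide_rectFuel fuel rect1 2 * get_sum rect2) max_result
        max (divide_rectFuel fuel rect2 2 * get_sum rect1) max_result
      else
        max (get_sum rect1 * get_sum rect2) max_result) 0
    (PySem.List.pyRange 1 w 1).foldl (fun max_result l2 =>
      let rect1_0 := (PySem.List.pyRange 0 h 1).map (fun _ => (PySem.List.pyRange 0 l2 1).map (fun _ => (0 : Int)))
      let rect2_0 := (PySem.List.pyRange 0 h 1).map (fun _ => (PySem.List.pyRange 0 (w - l2) 1).map (fun _ => (0 : Int)))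
      let p := (PySem.List.pyRange 0 h 1).foldl (fun (p : List (List Int) × List (List Int)) i =>
          (PySem.List.pyRange 0 w 1).foldl (fun (p : List (List Int) × List (List Int)) j =>
            if j < l2 then
              (PySem.List.pySetD p.1 i (PySem.List.pySetD (PySem.List.pyGetD p.1 i []) j
                 (PySem.List.pyGetD (PySem.List.pyGetD rect i []) j 0)), p.2)
            else
              (p.1, PySem.List.pySetD p.2 i (PySem.List.pySetD (PySem.List.pyGetD p.2 i []) (j - l2)
                 (PySem.List.pyGetD (PySem.List.pyGetD rect i []) j 0)))) p) (rect1_0, rect2_0)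
      let rect1 := p.1
      let rect2 := p.2
      if level = 1 then
        let max_result := max (divide_rectFuel fuel rect1 2 * get_sum rect2) max_result
        max (divide_rectFuel fuel rect2 2 * get_sum rect1) max_result
      else
        max (get_sum rect1 * get_sum rect2) max_result) m1

def divide_rect (rect : List (List Int)) (level : Int) : Int :=
  divide_rectFuel 2 rect level

-- ===== PORT B =====
def build_pref (rect : List (List Int)) (w : Int) : List (List Int) :=
  rect.foldl (fun pref row =>
    let prev := PySem.List.pyGetD pref (-1) []
    let st := (PySem.List.pyRange 0 w 1).foldl
      (fun (st : Int × List Int) j =>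
        let acc := st.1 + PySem.List.pyGetD row j 0
        (acc, st.2 ++ [PySem.List.pyGetD prev (j + 1) 0 + acc])) (0, [(0 : Int)])
    pref ++ [st.2]) [List.replicate (w + 1).toNat (0 : Int)]

def query (pref : List (List Int)) (i0 i1 j0 j1 : Int) : Int :=
  PySem.List.pyGetD (PySem.List.pyGetD pref i1 []) j1 0
    - PySem.List.pyGetD (PySem.List.pyGetD pref i1 []) j0 0
    - PySem.List.pyGetD (PySem.List.pyGetD pref i0 []) j1 0
    + PySem.List.pyGetD (PySem.List.pyGetD pref i0 []) j0 0

def split2 (pref : List (List Int)) (i0 i1 j0 j1 : Int) : Int :=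
  let best := (PySem.List.pyRange (i0 + 1) i1 1).foldl
    (fun best i => max best (query pref i0 i j0 j1 * query pref i i1 j0 j1)) 0
  (PySem.List.pyRange (j0 + 1) j1 1).foldl
    (fun best j => max best (query pref i0 i1 j0 j * query pref i0 i1 j j1)) best

def divide_rect_alt (rect : List (List Int)) (level : Int) : Int :=
  let h : Int := rect.length
  let w : Int := ((PySem.List.pyGetD rect 0 []).length : Int)
  let pref := build_pref rect w
  if level ≠ 1 then split2 pref 0 h 0 w
  else
    let best := (PySem.List.pyRange 1 h 1).foldl (fun best i =>
      let best := max best (split2 pref 0 i 0 w * query pref i h 0 w)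
      max best (split2 pref i h 0 w * query pref 0 i 0 w)) 0
    (PySem.List.pyRange 1 w 1).foldl (fun best j =>
      let best := max best (split2 pref 0 h 0 j * query pref 0 h j w)
      max best (split2 pref 0 h j w * query pref 0 h 0 j)) best

-- ===== PRECONDITION & SPEC =====
-- Pre_ excludes rect = [] and grids with a row shorter than rect[0] (A raises IndexError
-- there or in its recursion), and also ragged grids with rows LONGER than rect[0], where
-- A's re-reading of len(slice[0]) per slice accidentally includes or drops trailing cells.
def Pre_divide_rect (rect : List (List Int)) (level : Int) : Prop :=
  rect ≠ [] ∧ ∀ r ∈ rect, r.length = (rect.headD []).length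
instance (rect : List (List Int)) (level : Int) : Decidable (Pre_divide_rect rect level) := by
  unfold Pre_divide_rect; infer_instance
def pvWitness_divide_rect : List (List Int) × Int := ([[1, 2], [3, 4]], 1)

def Spec_divide_rect (rect : List (List Int)) (level : Int) (out : Int) : Prop := out = divide_rect_alt rect level
instance (rect : List (List Int)) (level : Int) (out : Int) : Decidable (Spec_divide_rect rect level out) := by unfold Spec_divide_rect; infer_instance

-- ===== CLAIM (what is proved, stated in full; the proofs are below) =====
def Claim_equal_divide_rect : Prop := ∀ (rect : List (List Int)) (level : Int), Dom_divide_rect rect level → Pre_divide_rect rect level → Spec_divide_rect rect level (divide_rect rect level)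

-- ===== LEMMAS AND PROOFS =====
-- ---------- proof-side abbreviations ----------
def rQ (r : List Int) (j : Nat) : Int := (r.take j).sum
def Qg (g : List (List Int)) (i j : Nat) : Int := ((g.take i).map (fun r => (r.take j).sum)).sum
def subg (g : List (List Int)) (a b c d : Nat) : List (List Int) :=
  ((g.drop a).take (b - a)).map (fun r => (r.drop c).take (d - c))
def SSg (g : List (List Int)) (a b c d : Nat) : Int := Qg g b d - Qg g b c - Qg g a d + Qg g a c

-- generic: sum of pointwise differences (no ready-made Mathlib list lemma)
theorem sum_map_sub_int (G : List (List Int)) (f g : List Int → Int) :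
    (G.map (fun r => f r - g r)).sum = (G.map f).sum - (G.map g).sum := by
  induction G with
  | nil => simp
  | cons r G ih => simp [ih]; ring

theorem rQ_zero (r : List Int) : rQ r 0 = 0 := rfl

theorem rQ_split (r : List Int) (c d : Nat) (h : c ≤ d) :
    rQ r d = rQ r c + ((r.drop c).take (d - c)).sum := by
  unfold rQ
  rw [show d = c + (d - c) by omega, List.take_add, List.sum_append]
  simp

theorem Qg_zero_row (g : List (List Int)) (j : Nat) : Qg g 0 j = 0 := by
  unfold Qg; simp

theorem Qg_split_rows (g : List (List Int)) (a b j : Nat) (h : a ≤ b) :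
    Qg g b j = Qg g a j + (((g.drop a).take (b - a)).map (fun r => rQ r j)).sum := by
  unfold Qg
  rw [show b = a + (b - a) by omega, List.take_add, List.map_append, List.sum_append]
  simp [rQ]

theorem SSg_eq_sum (g : List (List Int)) (a b c d : Nat) (hab : a ≤ b) (hcd : c ≤ d) :
    SSg g a b c d = (((g.drop a).take (b - a)).map (fun r => ((r.drop c).take (d - c)).sum)).sum := by
  unfold SSg
  rw [Qg_split_rows g a b d hab, Qg_split_rows g a b c hab]
  have : ∀ r : List Int, ((r.drop c).take (d - c)).sum = rQ r d - rQ r c := by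
    intro r; rw [rQ_split r c d hcd]; ring
  rw [List.map_congr_left (fun r _ => this r), sum_map_sub_int]
  ring

theorem subg_full (g : List (List Int)) (w : Nat) (hw : ∀ r ∈ g, r.length = w) :
    subg g 0 g.length 0 w = g := by
  unfold subg
  simp only [List.drop_zero, Nat.sub_zero, List.take_length]
  conv_rhs => rw [← List.map_id g]
  exact List.map_congr_left (fun r hr => by simp [hw r hr])

theorem get_sum_eq (g : List (List Int)) (w : Nat) (hw : ∀ r ∈ g, r.length = w)
    (hhead : (PySem.List.pyGetD g 0 []).length = w) :
    get_sum g = (g.map List.sum).sum := by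
  unfold get_sum
  rw [hhead]
  rw [PySem.List.foldl_pyRange_zero_pyGetD' g []
    (fun acc row => (PySem.List.pyRange 0 (w:Int) 1).foldl (fun r j => r + PySem.List.pyGetD row j 0) acc) 0]
  have step : ∀ (acc : Int) (row : List Int), row ∈ g →
      (PySem.List.pyRange 0 (w:Int) 1).foldl (fun r j => r + PySem.List.pyGetD row j 0) acc
        = acc + row.sum := by
    intro acc row hrow
    have hl : row.length = w := hw row hrow
    rw [← hl]
    rw [PySem.List.foldl_pyRange_zero_pyGetD' row 0 (fun r x => r + x) acc]
    simpa using PySem.List.foldl_add (fun x : Int => x) acc (l := row)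
  rw [PySem.List.foldl_congr_mem g _ (fun acc row => acc + row.sum) 0 step]
  simpa using PySem.List.foldl_add List.sum (0:Int) (l := g)

theorem subg_length (g : List (List Int)) (a b c d : Nat) (hb : b ≤ g.length) :
    (subg g a b c d).length = b - a := by
  unfold subg; simp; omega

theorem subg_rect (g : List (List Int)) (w : Nat) (hw : ∀ r ∈ g, r.length = w)
    (a b c d : Nat) (hdw : d ≤ w) :
    ∀ r ∈ subg g a b c d, r.length = d - c := by
  intro r hr
  unfold subg at hr
  obtain ⟨r0, hr0, rfl⟩ := List.mem_map.mp hr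
  have : r0 ∈ g := List.mem_of_mem_drop (List.mem_of_mem_take hr0)
  simp [hw r0 this]; omega

theorem subg_head (g : List (List Int)) (w : Nat) (hw : ∀ r ∈ g, r.length = w)
    (a b c d : Nat) (hdw : d ≤ w) (hab : a < b) (hb : b ≤ g.length) :
    (PySem.List.pyGetD (subg g a b c d) 0 []).length = d - c := by
  have hlen : (subg g a b c d).length = b - a := subg_length g a b c d hb
  have hne : subg g a b c d ≠ [] := by
    intro h; rw [h] at hlen; simp at hlen; omega
  cases hs : subg g a b c d with
  | nil => exact absurd hs hne
  | cons r rs =>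
    have : r ∈ subg g a b c d := by rw [hs]; exact List.mem_cons_self
    simpa [PySem.List.pyGetD_zero_cons] using subg_rect g w hw a b c d hdw r this

theorem get_sum_subg (g : List (List Int)) (w : Nat) (hw : ∀ r ∈ g, r.length = w)
    (a b c d : Nat) (hab : a ≤ b) (hb : b ≤ g.length) (hcd : c ≤ d) (hdw : d ≤ w) :
    get_sum (subg g a b c d) = SSg g a b c d := by
  rcases Nat.eq_or_lt_of_le hab with rfl | hab'
  · have : subg g a a c d = [] := by
      apply List.eq_nil_of_length_eq_zero; rw [subg_length g a a c d hb]; omega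
    rw [this]
    simp [get_sum, SSg]
  · rw [get_sum_eq (subg g a b c d) (d - c) (subg_rect g w hw a b c d hdw)
      (subg_head g w hw a b c d hdw hab' hb)]
    rw [SSg_eq_sum g a b c d hab hcd]
    unfold subg
    rw [List.map_map]
    rfl

-- ---------- prefix table ----------
theorem inner_eq (row : List Int) (w : Nat) (hwl : w ≤ row.length) (S : Nat → Int) (hS0 : S 0 = 0)
    (prev : List Int) (hprev : prev = (List.range (w + 1)).map S) (m : Nat) (hm : m ≤ w) :
    (PySem.List.pyRange 0 (m : Int) 1).foldl
      (fun (st : Int × List Int) j =>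
        let acc := st.1 + PySem.List.pyGetD row j 0
        (acc, st.2 ++ [PySem.List.pyGetD prev (j + 1) 0 + acc])) (0, [(0 : Int)])
    = (rQ row m, (List.range (m + 1)).map (fun j => S j + rQ row j)) := by
  induction m with
  | zero => simp [rQ_zero, hS0]
  | succ m ih =>
    have hm' : m ≤ w := by omega
    rw [show ((m + 1 : Nat) : Int) = (m : Int) + 1 by push_cast; ring,
      PySem.List.pyRange_one_succ_right (by positivity), List.foldl_append, ih hm']
    have hrowm : PySem.List.pyGetD row ((m : Nat) : Int) 0 = row[m]'(by omega) := by
      simp [show m < row.length by omega]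
    have hacc2 : rQ row m + row[m]'(by omega) = rQ row (m + 1) := by
      unfold rQ
      rw [List.take_succ_eq_append_getElem (by omega), List.sum_append]; simp
    have hprevm : PySem.List.pyGetD prev ((m : Int) + 1) 0 = S (m + 1) := by
      rw [hprev, show ((m : Int) + 1) = ((m + 1 : Nat) : Int) by push_cast; ring,
        PySem.List.pyGetD_natCast]
      exact PySem.List.getD_map_range S (w + 1) (m + 1) 0 (by omega)
    simp only [List.foldl_cons, List.foldl_nil, hrowm, hprevm]
    refine Prod.ext (by simpa using hacc2) ?_
    simp only []
    rw [List.range_succ (n := m + 1), List.map_append]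
    simp [hacc2]

theorem build_loop (g : List (List Int)) (w : Nat) (hw : ∀ r ∈ g, r.length = w)
    (pref : List (List Int)) (S : Nat → Int) (hS0 : S 0 = 0)
    (hlast : PySem.List.pyGetD pref (-1) [] = (List.range (w + 1)).map S) :
    g.foldl (fun pref row =>
      let prev := PySem.List.pyGetD pref (-1) []
      let st := (PySem.List.pyRange 0 (w : Int) 1).foldl
        (fun (st : Int × List Int) j =>
          let acc := st.1 + PySem.List.pyGetD row j 0
          (acc, st.2 ++ [PySem.List.pyGetD prev (j + 1) 0 + acc])) (0, [(0 : Int)])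
      pref ++ [st.2]) pref
    = pref ++ (List.range g.length).map (fun i =>
        (List.range (w + 1)).map (fun j => S j + Qg g (i + 1) j)) := by
  induction g generalizing pref S with
  | nil => simp
  | cons row g ih =>
    have hrow : row.length = w := hw row List.mem_cons_self
    have hcur := inner_eq row w (by omega) S hS0 _ hlast w (le_refl w)
    simp only [List.foldl_cons]
    rw [hcur]
    rw [ih (fun r hr => hw r (List.mem_cons_of_mem _ hr)) (pref ++ [(List.range (w + 1)).map (fun j => S j + rQ row j)])
      (fun j => S j + rQ row j) (by simp [hS0, rQ_zero])
      (by rw [PySem.List.pyGetD_neg_one_append_singleton])]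
    have tail : (List.range (g.length + 1)).map (fun i => (List.range (w + 1)).map (fun j => S j + Qg (row :: g) (i + 1) j))
        = ((List.range (w + 1)).map (fun j => S j + rQ row j))
          :: (List.range g.length).map (fun i => (List.range (w + 1)).map (fun j => S j + rQ row j + Qg g (i + 1) j)) := by
      rw [List.range_succ_eq_map (n := g.length), List.map_cons, List.map_map]
      congr 1
      · apply List.map_congr_left; intro j _
        have h1 : Qg (row :: g) 1 j = rQ row j := by unfold Qg rQ; simp
        rw [h1]
      · apply List.map_congr_left; intro i _
        simp only [Function.comp_apply]
        apply List.map_congr_left; intro j _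
        have h2 : Qg (row :: g) (i + 1 + 1) j = rQ row j + Qg g (i + 1) j := by
          unfold Qg rQ; simp [List.take_succ_cons]
        rw [h2]; ring
    rw [show (row :: g).length = g.length + 1 from rfl, tail, List.append_assoc, List.singleton_append]

theorem build_pref_eq (g : List (List Int)) (w : Nat) (hw : ∀ r ∈ g, r.length = w) :
    build_pref g (w : Int)
      = (List.range (g.length + 1)).map (fun i => (List.range (w + 1)).map (fun j => Qg g i j)) := by
  unfold build_pref
  have h0 : List.replicate ((w : Int) + 1).toNat (0 : Int)
      = (List.range (w + 1)).map (fun _ => (0 : Int)) := by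
    rw [List.map_const', List.length_range]
    congr 1
  rw [h0]
  rw [build_loop g w hw [(List.range (w + 1)).map (fun _ => (0 : Int))] (fun _ => 0) rfl
    (by exact PySem.List.pyGetD_neg_one_append_singleton [] _ _)]
  rw [List.range_succ_eq_map (n := g.length), List.map_cons, List.map_map, List.singleton_append]
  refine congrArg₂ List.cons ?_ ?_
  · apply List.map_congr_left; intro j _
    simp [Qg_zero_row]
  · apply List.map_congr_left; intro i _
    simp only [Function.comp_apply]
    apply List.map_congr_left; intro j _
    rw [zero_add]

theorem pref_lookup (g : List (List Int)) (w : Nat) (hw : ∀ r ∈ g, r.length = w)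
    (i j : Nat) (hi : i ≤ g.length) (hj : j ≤ w) :
    PySem.List.pyGetD (PySem.List.pyGetD (build_pref g (w : Int)) (i : Int) []) ((j : Nat) : Int) 0
      = Qg g i j := by
  rw [build_pref_eq g w hw, PySem.List.pyGetD_natCast, PySem.List.pyGetD_natCast,
    PySem.List.getD_map_range _ _ _ _ (by omega), PySem.List.getD_map_range _ _ _ _ (by omega)]

theorem query_eq (g : List (List Int)) (w : Nat) (hw : ∀ r ∈ g, r.length = w)
    (a b c d : Nat) (hb : b ≤ g.length) (ha : a ≤ g.length) (hc : c ≤ w) (hd : d ≤ w) :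
    query (build_pref g (w : Int)) (a : Int) (b : Int) (c : Int) (d : Int) = SSg g a b c d := by
  unfold query SSg
  rw [pref_lookup g w hw b d hb hd, pref_lookup g w hw b c hb hc,
    pref_lookup g w hw a d ha hd, pref_lookup g w hw a c ha hc]

-- ---------- A's fill loops ----------
theorem foldl_pair_fst {α : Type} (js : List α) (f : List (List Int) → α → List (List Int))
    (m1 m2 : List (List Int)) :
    js.foldl (fun (p : List (List Int) × List (List Int)) j => (f p.1 j, p.2)) (m1, m2)
      = (js.foldl f m1, m2) := by
  induction js generalizing m1 with
  | nil => rfl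
  | cons j js ih => simp [ih]

theorem foldl_pair_snd {α : Type} (js : List α) (f : List (List Int) → α → List (List Int))
    (m1 m2 : List (List Int)) :
    js.foldl (fun (p : List (List Int) × List (List Int)) j => (p.1, f p.2 j)) (m1, m2)
      = (m1, js.foldl f m2) := by
  induction js generalizing m2 with
  | nil => rfl
  | cons j js ih => simp [ih]

theorem pySetD_self (M : List (List Int)) (t : Nat) (ht : t < M.length) :
    PySem.List.pySetD M (t : Int) (PySem.List.pyGetD M (t : Int) []) = M := by
  simp [List.getD_eq_getElem?_getD, List.getElem?_eq_getElem ht]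

theorem foldl_setrow {α : Type} (js : List α) (t : Nat) (F : List Int → α → List Int)
    (M : List (List Int)) (ht : t < M.length) :
    js.foldl (fun A j => PySem.List.pySetD A (t : Int) (F (PySem.List.pyGetD A (t : Int) []) j)) M
      = PySem.List.pySetD M (t : Int) (js.foldl F (PySem.List.pyGetD M (t : Int) [])) := by
  induction js generalizing M with
  | nil => exact (pySetD_self M t ht).symm
  | cons j js ih =>
    simp only [List.foldl_cons]
    rw [ih (PySem.List.pySetD M (t : Int) (F (PySem.List.pyGetD M (t : Int) []) j)) (by simpa using ht)]
    simp [List.set_set, List.getD_eq_getElem?_getD, List.getElem?_set_self', List.getElem?_eq_getElem ht]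

theorem rowfill (r' : List Int) (n : Nat) (hn : n ≤ r'.length) (s : Nat) (hs : s ≤ n) :
    (List.range s).foldl
      (fun row k => PySem.List.pySetD row ((k : Nat) : Int) (PySem.List.pyGetD r' ((k : Nat) : Int) 0))
      (List.replicate n (0 : Int))
    = r'.take s ++ List.replicate (n - s) 0 := by
  induction s with
  | zero => simp
  | succ s ih =>
    rw [List.range_succ, List.foldl_append, ih (by omega)]
    simp only [List.foldl_cons, List.foldl_nil, PySem.List.pySetD_natCast]
    have hsr : s < r'.length := by omega
    rw [List.set_append_right _ _ (by simp)]
    have hv : PySem.List.pyGetD r' ((s : Nat) : Int) 0 = r'[s] := by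
      simp [List.getD_eq_getElem?_getD, List.getElem?_eq_getElem hsr]
    have hlen : (r'.take s).length = s := by simp; omega
    rw [hlen, Nat.sub_self]
    have : (List.replicate (n - s) (0 : Int)).set 0 (PySem.List.pyGetD r' ((s : Nat) : Int) 0)
        = PySem.List.pyGetD r' ((s : Nat) : Int) 0 :: List.replicate (n - (s + 1)) 0 := by
      have h1 : n - s = (n - (s + 1)) + 1 := by omega
      rw [h1, List.replicate_succ]; simp
    rw [this, hv, List.take_succ_eq_append_getElem hsr, List.append_assoc, List.singleton_append]

theorem fill_inner (w' l2 t : Nat) (hl2 : l2 ≤ w') (r : List Int) (hr : r.length = w')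
    (M1 M2 : List (List Int)) (ht1 : t < M1.length) (ht2 : t < M2.length)
    (hrow1 : PySem.List.pyGetD M1 (t : Int) [] = List.replicate l2 0)
    (hrow2 : PySem.List.pyGetD M2 (t : Int) [] = List.replicate (w' - l2) 0) :
    (PySem.List.pyRange 0 (w' : Int) 1).foldl
      (fun (p : List (List Int) × List (List Int)) j =>
        if j < (l2 : Int) then
          (PySem.List.pySetD p.1 (t : Int) (PySem.List.pySetD (PySem.List.pyGetD p.1 (t : Int) []) j (PySem.List.pyGetD r j 0)), p.2)
        else
          (p.1, PySem.List.pySetD p.2 (t : Int) (PySem.List.pySetD (PySem.List.pyGetD p.2 (t : Int) []) (j - (l2 : Int)) (PySem.List.pyGetD r j 0))))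
      (M1, M2)
    = (PySem.List.pySetD M1 (t : Int) (r.take l2), PySem.List.pySetD M2 (t : Int) (r.drop l2)) := by
  rw [PySem.List.pyRange_one_append 0 (l2 : Int) (w' : Int) (by positivity) (by exact_mod_cast hl2),
    List.foldl_append]
  have seg1 : (PySem.List.pyRange 0 (l2 : Int) 1).foldl
      (fun (p : List (List Int) × List (List Int)) j =>
        if j < (l2 : Int) then
          (PySem.List.pySetD p.1 (t : Int) (PySem.List.pySetD (PySem.List.pyGetD p.1 (t : Int) []) j (PySem.List.pyGetD r j 0)), p.2)
        else
          (p.1, PySem.List.pySetD p.2 (t : Int) (PySem.List.pySetD (PySem.List.pyGetD p.2 (t : Int) []) (j - (l2 : Int)) (PySem.List.pyGetD r j 0))))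
      (M1, M2)
      = (PySem.List.pySetD M1 (t : Int) (r.take l2), M2) := by
    rw [PySem.List.foldl_congr_mem _ _
      (fun (p : List (List Int) × List (List Int)) j =>
        (PySem.List.pySetD p.1 (t : Int) (PySem.List.pySetD (PySem.List.pyGetD p.1 (t : Int) []) j (PySem.List.pyGetD r j 0)), p.2))
      (M1, M2)
      (fun p j hj => by rw [if_pos ((PySem.List.mem_pyRange_one.mp hj).2)])]
    rw [foldl_pair_fst _ (fun A j => PySem.List.pySetD A (t : Int) (PySem.List.pySetD (PySem.List.pyGetD A (t : Int) []) j (PySem.List.pyGetD r j 0))) M1 M2]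
    rw [foldl_setrow _ t (fun row j => PySem.List.pySetD row j (PySem.List.pyGetD r j 0)) M1 ht1, hrow1]
    rw [PySem.List.pyRange_one 0 (l2 : Int)]
    simp only [Int.sub_zero, Int.toNat_natCast, zero_add, List.foldl_map]
    rw [rowfill r l2 (by omega) l2 le_rfl]
    simp
  rw [seg1]
  -- second segment: only the second matrix is touched
  rw [PySem.List.pyRange_one (l2 : Int) (w' : Int)]
  have hcast : ((w' : Int) - (l2 : Int)).toNat = w' - l2 := by omega
  rw [hcast, List.foldl_map]
  rw [PySem.List.foldl_congr_mem _ _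
    (fun (p : List (List Int) × List (List Int)) (k : Nat) =>
      (p.1, PySem.List.pySetD p.2 (t : Int) (PySem.List.pySetD (PySem.List.pyGetD p.2 (t : Int) []) ((k : Nat) : Int) (PySem.List.pyGetD (r.drop l2) ((k : Nat) : Int) 0))))
    _
    (fun p k hk => by
      have hk' : k < w' - l2 := List.mem_range.mp hk
      have h2 : PySem.List.pyGetD r ((l2 : Int) + (k : Int)) 0 = PySem.List.pyGetD (r.drop l2) ((k : Nat) : Int) 0 := by
        have hlk : l2 + k < r.length := by omega
        have hkd : k < (r.drop l2).length := by simp; omega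
        rw [show ((l2 : Int) + (k : Int)) = ((l2 + k : Nat) : Int) by omega,
          PySem.List.pyGetD_natCast, PySem.List.pyGetD_natCast,
          List.getD_eq_getElem?_getD, List.getElem?_eq_getElem hlk,
          List.getD_eq_getElem?_getD, List.getElem?_eq_getElem hkd]
        exact List.getElem_drop.symm
      simp only [if_neg (show ¬((l2 : Int) + (k : Int) < (l2 : Int)) by omega)]
      rw [show ((l2 : Int) + (k : Int)) - (l2 : Int) = ((k : Nat) : Int) by ring, h2])]
  rw [foldl_pair_snd _ (fun A (k : Nat) => PySem.List.pySetD A (t : Int) (PySem.List.pySetD (PySem.List.pyGetD A (t : Int) []) ((k : Nat) : Int) (PySem.List.pyGetD (r.drop l2) ((k : Nat) : Int) 0))) (PySem.List.pySetD M1 (t : Int) (r.take l2)) M2]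
  rw [foldl_setrow _ t (fun row (k : Nat) => PySem.List.pySetD row ((k : Nat) : Int) (PySem.List.pyGetD (r.drop l2) ((k : Nat) : Int) 0)) M2 ht2, hrow2]
  rw [rowfill (r.drop l2) (w' - l2) (by simp; omega) (w' - l2) le_rfl]
  simp only [Nat.sub_self, List.replicate_zero, List.append_nil]
  rw [show List.take (w' - l2) (List.drop l2 r) = List.drop l2 r from
    List.take_of_length_le (by simp [hr])]

theorem getD_append_replicate (A : List (List Int)) (q : Nat) (z : List Int) (s : Nat)
    (h : A.length = s) (hq : 0 < q) :
    PySem.List.pyGetD (A ++ List.replicate q z) ((s : Nat) : Int) [] = z := by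
  simp [List.getD_eq_getElem?_getD, List.getElem?_append_right (by omega : A.length ≤ s), h]
  simp [hq]

theorem set_append_replicate (A : List (List Int)) (q : Nat) (z v : List Int) (s : Nat)
    (h : A.length = s) (hq : 0 < q) :
    (A ++ List.replicate q z).set s v = (A ++ [v]) ++ List.replicate (q - 1) z := by
  rw [List.set_append_right _ _ (by omega), h, Nat.sub_self]
  cases q with
  | zero => omega
  | succ q => simp [List.replicate_succ]

theorem fill_outer (m : List (List Int)) (w' l2 : Nat) (hw : ∀ r ∈ m, r.length = w')
    (hl2 : l2 ≤ w') (s : Nat) (hs : s ≤ m.length) :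
    (List.range s).foldl
      (fun (p : List (List Int) × List (List Int)) (t : Nat) =>
        (PySem.List.pyRange 0 (w' : Int) 1).foldl
          (fun (p : List (List Int) × List (List Int)) j =>
            if j < (l2 : Int) then
              (PySem.List.pySetD p.1 ((t : Nat) : Int) (PySem.List.pySetD (PySem.List.pyGetD p.1 ((t : Nat) : Int) []) j (PySem.List.pyGetD (PySem.List.pyGetD m ((t : Nat) : Int) []) j 0)), p.2)
            else
              (p.1, PySem.List.pySetD p.2 ((t : Nat) : Int) (PySem.List.pySetD (PySem.List.pyGetD p.2 ((t : Nat) : Int) []) (j - (l2 : Int)) (PySem.List.pyGetD (PySem.List.pyGetD m ((t : Nat) : Int) []) j 0)))) p)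
      (List.replicate m.length (List.replicate l2 0), List.replicate m.length (List.replicate (w' - l2) 0))
    = ((m.take s).map (fun r => r.take l2) ++ List.replicate (m.length - s) (List.replicate l2 0),
       (m.take s).map (fun r => r.drop l2) ++ List.replicate (m.length - s) (List.replicate (w' - l2) 0)) := by
  induction s with
  | zero => simp
  | succ s ih =>
    rw [List.range_succ, List.foldl_append, ih (by omega)]
    simp only [List.foldl_cons, List.foldl_nil]
    have hsm : s < m.length := by omega
    have hA1 : ((m.take s).map (fun r => r.take l2)).length = s := by simp; omega
    have hA2 : ((m.take s).map (fun r => r.drop l2)).length = s := by simp; omega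
    have hq : 0 < m.length - s := by omega
    have hr : (PySem.List.pyGetD m ((s : Nat) : Int) []).length = w' := by
      rw [PySem.List.pyGetD_natCast, List.getD_eq_getElem?_getD, List.getElem?_eq_getElem hsm]
      exact hw _ (List.getElem_mem hsm)
    rw [fill_inner w' l2 s hl2 (PySem.List.pyGetD m ((s : Nat) : Int) []) hr _ _
      (by rw [List.length_append, hA1]; simp; omega)
      (by rw [List.length_append, hA2]; simp; omega)
      (getD_append_replicate _ _ _ s hA1 hq)
      (getD_append_replicate _ _ _ s hA2 hq)]
    have hms : PySem.List.pyGetD m ((s : Nat) : Int) [] = m[s]'hsm := by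
      rw [PySem.List.pyGetD_natCast, List.getD_eq_getElem?_getD, List.getElem?_eq_getElem hsm]
      rfl
    refine Prod.ext ?_ ?_
    · simp only [PySem.List.pySetD_natCast]
      rw [set_append_replicate _ _ _ _ s hA1 hq, hms,
        List.take_succ_eq_append_getElem hsm, List.map_append]
      simp only [List.map_cons, List.map_nil]
      congr 1
    · simp only [PySem.List.pySetD_natCast]
      rw [set_append_replicate _ _ _ _ s hA2 hq, hms,
        List.take_succ_eq_append_getElem hsm, List.map_append]
      simp only [List.map_cons, List.map_nil]
      congr 1

-- ---------- subg algebra ----------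
theorem subg_take (g : List (List Int)) (a b c d t : Nat) (ht : t ≤ b - a) :
    (subg g a b c d).take t = subg g a (a + t) c d := by
  unfold subg
  rw [← List.map_take, List.take_take, min_eq_left ht, Nat.add_sub_cancel_left]


theorem subg_drop (g : List (List Int)) (a b c d t : Nat) :
    (subg g a b c d).drop t = subg g (a + t) b c d := by
  unfold subg
  rw [← List.map_drop, List.drop_take, List.drop_drop,
    show (b - a) - t = b - (a + t) from by omega]

theorem subg_map_take (g : List (List Int)) (a b c d t : Nat) (ht : t ≤ d - c) :
    (subg g a b c d).map (fun r => r.take t) = subg g a b c (c + t) := by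
  unfold subg
  rw [List.map_map]
  apply List.map_congr_left
  intro r _
  simp only [Function.comp_apply]
  rw [List.take_take, min_eq_left ht, Nat.add_sub_cancel_left]

theorem subg_map_drop (g : List (List Int)) (a b c d t : Nat) :
    (subg g a b c d).map (fun r => r.drop t) = subg g a b (c + t) d := by
  unfold subg
  rw [List.map_map]
  apply List.map_congr_left
  intro r _
  simp only [Function.comp_apply]
  rw [List.drop_take, List.drop_drop,
    show (d - c) - t = d - (c + t) from by omega]

-- ---------- fold plumbing ----------
theorem foldl_pyRange_shift (a b : Int) (n : Nat) (hn : (b - a).toNat = n)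
    (f : Int → Int → Int) (init : Int) :
    (PySem.List.pyRange a b 1).foldl f init
      = (List.range n).foldl (fun acc (k : Nat) => f acc (a + (k : Int))) init := by
  rw [PySem.List.pyRange_one a b, hn, List.foldl_map]

theorem foldl_pyRange_shift_pair (a b : Int) (n : Nat) (hn : (b - a).toNat = n)
    {σ : Type} (f : σ → Int → σ) (init : σ) :
    (PySem.List.pyRange a b 1).foldl f init
      = (List.range n).foldl (fun acc (k : Nat) => f acc (a + (k : Int))) init := by
  rw [PySem.List.pyRange_one a b, hn, List.foldl_map]

theorem foldl_range_congr (n : Nat) (f g : Int → Nat → Int) (init : Int)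
    (h : ∀ k, k < n → ∀ acc, f acc k = g acc k) :
    (List.range n).foldl f init = (List.range n).foldl g init :=
  PySem.List.foldl_congr_mem _ _ _ init (fun acc k hk => h k (List.mem_range.mp hk) acc)

theorem fill_eq (m : List (List Int)) (w' l2 H : Nat) (hw : ∀ r ∈ m, r.length = w')
    (hl2 : l2 ≤ w') (hH : m.length = H) :
    (PySem.List.pyRange 0 (H : Int) 1).foldl
      (fun (p : List (List Int) × List (List Int)) i =>
        (PySem.List.pyRange 0 (w' : Int) 1).foldl
          (fun (p : List (List Int) × List (List Int)) j =>
            if j < (l2 : Int) then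
              (PySem.List.pySetD p.1 i (PySem.List.pySetD (PySem.List.pyGetD p.1 i []) j (PySem.List.pyGetD (PySem.List.pyGetD m i []) j 0)), p.2)
            else
              (p.1, PySem.List.pySetD p.2 i (PySem.List.pySetD (PySem.List.pyGetD p.2 i []) (j - (l2 : Int)) (PySem.List.pyGetD (PySem.List.pyGetD m i []) j 0)))) p)
      ((PySem.List.pyRange 0 (H : Int) 1).map (fun _ => (PySem.List.pyRange 0 (l2 : Int) 1).map (fun _ => (0 : Int))),
       (PySem.List.pyRange 0 (H : Int) 1).map (fun _ => (PySem.List.pyRange 0 ((w' : Int) - (l2 : Int)) 1).map (fun _ => (0 : Int))))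
    = (m.map (fun r => r.take l2), m.map (fun r => r.drop l2)) := by
  cases hH
  have z1 : (PySem.List.pyRange 0 (l2 : Int) 1).map (fun _ => (0 : Int)) = List.replicate l2 0 := by
    rw [List.map_const', PySem.List.length_pyRange_one]; congr 1
  have z2 : (PySem.List.pyRange 0 ((w' : Int) - (l2 : Int)) 1).map (fun _ => (0 : Int))
      = List.replicate (w' - l2) 0 := by
    rw [List.map_const', PySem.List.length_pyRange_one]; congr 1; omega
  have zz : ∀ z : List Int,
      (PySem.List.pyRange 0 (m.length : Int) 1).map (fun _ => z) = List.replicate m.length z := by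
    intro z; rw [List.map_const', PySem.List.length_pyRange_one]; congr 1
  rw [z1, z2, zz, zz]
  rw [foldl_pyRange_shift_pair 0 (m.length : Int) m.length (by omega)]
  have := fill_outer m w' l2 hw hl2 m.length le_rfl
  simp only [List.take_length, Nat.sub_self, List.replicate_zero, List.append_nil] at this
  rw [← this]
  apply PySem.List.foldl_congr_mem
  intro p k _
  simp only [zero_add]

theorem foldl_range_congr2 (n : Nat) (f g : Int → Nat → Int) (i1 i2 : Int)
    (hi : i1 = i2) (h : ∀ k, k < n → ∀ acc, f acc k = g acc k) :
    (List.range n).foldl f i1 = (List.range n).foldl g i2 := by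
  rw [hi]; exact foldl_range_congr n f g i2 h
theorem A2_eq (f : Nat) (g : List (List Int)) (w : Nat) (hw : ∀ r ∈ g, r.length = w)
    (lv : Int) (hlv : ¬ lv = 1) (a b c d : Nat)
    (hab : a < b) (hb : b ≤ g.length) (hcd : c ≤ d) (hdw : d ≤ w) :
    divide_rectFuel (f + 1) (subg g a b c d) lv
      = split2 (build_pref g (w : Int)) (a : Int) (b : Int) (c : Int) (d : Int) := by
  have hpl : ((subg g a b c d).length : Int) = ((b - a : Nat) : Int) := by
    rw [subg_length g a b c d hb]
  have hph : ((PySem.List.pyGetD (subg g a b c d) 0 []).length : Int) = ((d - c : Nat) : Int) := by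
    rw [subg_head g w hw a b c d hdw hab hb]
  simp only [divide_rectFuel, if_neg hlv]
  rw [hpl, hph]
  unfold split2
  rw [foldl_pyRange_shift 1 ((b - a : Nat) : Int) (b - a - 1) (by omega),
      foldl_pyRange_shift 1 ((d - c : Nat) : Int) (d - c - 1) (by omega),
      foldl_pyRange_shift ((a : Int) + 1) (b : Int) (b - a - 1) (by omega),
      foldl_pyRange_shift ((c : Int) + 1) (d : Int) (d - c - 1) (by omega)]
  refine foldl_range_congr2 _ _ _ _ _ ?_ ?_
  · -- horizontal folds agree
    apply foldl_range_congr
    intro k hk acc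
    have e1 : (1 + (k : Int)) = ((1 + k : Nat) : Int) := by push_cast; ring
    rw [e1, PySem.List.slice_to_natCast, PySem.List.slice_from_natCast,
      subg_take g a b c d (1 + k) (by omega), subg_drop g a b c d (1 + k),
      get_sum_subg g w hw a (a + (1 + k)) c d (by omega) (by omega) hcd hdw,
      get_sum_subg g w hw (a + (1 + k)) b c d (by omega) hb hcd hdw]
    have e2 : ((a : Int) + 1 + (k : Int)) = ((a + (1 + k) : Nat) : Int) := by push_cast; ring
    rw [e2, query_eq g w hw a (a + (1 + k)) c d (by omega) (by omega) (by omega) (by omega),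
      query_eq g w hw (a + (1 + k)) b c d hb (by omega) (by omega) (by omega)]
    exact max_comm _ _
  · -- vertical folds agree
    intro k hk acc
    have e1 : (1 + (k : Int)) = ((1 + k : Nat) : Int) := by push_cast; ring
    rw [e1]
    rw [fill_eq (subg g a b c d) (d - c) (1 + k) (b - a) (subg_rect g w hw a b c d hdw)
      (by omega) (subg_length g a b c d hb)]
    simp only []
    rw [subg_map_take g a b c d (1 + k) (by omega), subg_map_drop g a b c d (1 + k),
      get_sum_subg g w hw a b c (c + (1 + k)) (by omega) hb (by omega) (by omega),
      get_sum_subg g w hw a b (c + (1 + k)) d (by omega) hb (by omega) hdw]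
    have e2 : ((c : Int) + 1 + (k : Int)) = ((c + (1 + k) : Nat) : Int) := by push_cast; ring
    rw [e2, query_eq g w hw a b c (c + (1 + k)) hb (by omega) (by omega) (by omega),
      query_eq g w hw a b (c + (1 + k)) d hb (by omega) (by omega) hdw]
    exact max_comm _ _

theorem foldl_pyRange_congr2 (a b : Int) (f g : Int → Int → Int) (i1 i2 : Int) (hi : i1 = i2)
    (h : ∀ x, a ≤ x → x < b → ∀ acc, f acc x = g acc x) :
    (PySem.List.pyRange a b 1).foldl f i1 = (PySem.List.pyRange a b 1).foldl g i2 := by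
  rw [hi]
  apply PySem.List.foldl_congr_mem
  intro acc x hx
  exact h x (PySem.List.mem_pyRange_one.mp hx).1 (PySem.List.mem_pyRange_one.mp hx).2 acc

theorem subg_take0 (g : List (List Int)) (w : Nat) (hw : ∀ r ∈ g, r.length = w)
    (t : Nat) (ht : t ≤ g.length) : g.take t = subg g 0 t 0 w := by
  conv_lhs => rw [← subg_full g w hw]
  rw [subg_take g 0 g.length 0 w t (by omega), Nat.zero_add]

theorem subg_drop0 (g : List (List Int)) (w : Nat) (hw : ∀ r ∈ g, r.length = w)
    (t : Nat) : g.drop t = subg g t g.length 0 w := by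
  conv_lhs => rw [← subg_full g w hw]
  rw [subg_drop g 0 g.length 0 w t, Nat.zero_add]

theorem subg_mtake0 (g : List (List Int)) (w : Nat) (hw : ∀ r ∈ g, r.length = w)
    (t : Nat) (ht : t ≤ w) : g.map (fun r => r.take t) = subg g 0 g.length 0 t := by
  conv_lhs => rw [← subg_full g w hw]
  rw [subg_map_take g 0 g.length 0 w t (by omega), Nat.zero_add]

theorem subg_mdrop0 (g : List (List Int)) (w : Nat) (hw : ∀ r ∈ g, r.length = w)
    (t : Nat) : g.map (fun r => r.drop t) = subg g 0 g.length t w := by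
  conv_lhs => rw [← subg_full g w hw]
  rw [subg_map_drop g 0 g.length 0 w t, Nat.zero_add]

-- ===== VERDICT (by name: the statement is the Claim_ definition above) =====
theorem divide_rect_spec : Claim_equal_divide_rect := by
  unfold Claim_equal_divide_rect
  intro rect level _ hpre
  unfold Spec_divide_rect
  obtain ⟨hne, hrect⟩ := hpre
  have hlen : 0 < rect.length := List.length_pos_of_ne_nil hne
  have hhead : PySem.List.pyGetD rect 0 [] = rect.headD [] := by
    cases rect with
    | nil => exact absurd rfl hne
    | cons x xs => simp [PySem.List.pyGetD_zero_cons]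
  have hw : ∀ r ∈ rect, r.length = (PySem.List.pyGetD rect 0 []).length := by
    intro r hr; rw [hhead]; exact hrect r hr
  unfold divide_rect divide_rect_alt
  set W := (PySem.List.pyGetD rect 0 []).length with hWdef
  by_cases hl : level = 1
  · -- level = 1
    subst hl
    rw [if_neg (by simp)]
    rw [show (2 : Nat) = 0 + 1 + 1 from rfl]
    generalize hf : (0 + 1 : Nat) = f1
    simp only [divide_rectFuel]
    refine foldl_pyRange_congr2 _ _ _ _ _ _ ?_ ?_
    · -- horizontal cut loop
      apply foldl_pyRange_congr2 _ _ _ _ _ _ rfl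
      intro x h1x hxh acc
      obtain ⟨n1, rfl⟩ := Int.eq_ofNat_of_zero_le (le_trans (by norm_num) h1x)
      have hn1a : 1 ≤ n1 := by exact_mod_cast h1x
      have hn1b : n1 < rect.length := by exact_mod_cast hxh
      rw [PySem.List.slice_to_natCast, PySem.List.slice_from_natCast,
        subg_take0 rect W hw n1 (by omega), subg_drop0 rect W hw n1]
      have hA2a := A2_eq 0 rect W hw 2 (by norm_num) 0 n1 0 W (by omega) (by omega) (by omega) le_rfl
      have hA2b := A2_eq 0 rect W hw 2 (by norm_num) n1 rect.length 0 W (by omega) le_rfl (by omega) le_rfl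
      rw [hf] at hA2a hA2b
      rw [hA2a, hA2b,
        get_sum_subg rect W hw 0 n1 0 W (by omega) (by omega) (by omega) le_rfl,
        get_sum_subg rect W hw n1 rect.length 0 W (by omega) le_rfl (by omega) le_rfl]
      have q1 := query_eq rect W hw n1 rect.length 0 W le_rfl (by omega) (by omega) le_rfl
      have q2 := query_eq rect W hw 0 n1 0 W (by omega) (by omega) (by omega) le_rfl
      simp only [Nat.cast_zero] at q1 q2 ⊢
      rw [q1, q2]
      simp [max_comm, max_left_comm]
    · -- vertical cut loop
      intro x h1x hxw acc
      obtain ⟨n2, rfl⟩ := Int.eq_ofNat_of_zero_le (le_trans (by norm_num) h1x)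
      have hn2a : 1 ≤ n2 := by exact_mod_cast h1x
      have hn2b : n2 < W := by exact_mod_cast hxw
      rw [fill_eq rect W n2 rect.length hw (by omega) rfl]
      rw [subg_mtake0 rect W hw n2 (by omega), subg_mdrop0 rect W hw n2]
      have hA2a := A2_eq 0 rect W hw 2 (by norm_num) 0 rect.length 0 n2 (by omega) le_rfl (by omega) (by omega)
      have hA2b := A2_eq 0 rect W hw 2 (by norm_num) 0 rect.length n2 W (by omega) le_rfl (by omega) le_rfl
      rw [hf] at hA2a hA2b
      rw [hA2a, hA2b,
        get_sum_subg rect W hw 0 rect.length 0 n2 (by omega) le_rfl (by omega) (by omega),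
        get_sum_subg rect W hw 0 rect.length n2 W (by omega) le_rfl (by omega) le_rfl]
      have q1 := query_eq rect W hw 0 rect.length n2 W le_rfl (by omega) (by omega) le_rfl
      have q2 := query_eq rect W hw 0 rect.length 0 n2 le_rfl (by omega) (by omega) (by omega)
      simp only [Nat.cast_zero] at q1 q2 ⊢
      rw [q1, q2]
      simp [max_comm, max_left_comm]
  · -- level ≠ 1
    rw [if_pos hl]
    conv_lhs => rw [← subg_full rect W hw]
    rw [show (2 : Nat) = 1 + 1 from rfl,
      A2_eq 1 rect W hw level hl 0 rect.length 0 W hlen le_rfl (by omega) le_rfl]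
    simp
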